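-- pv_equiv track=rewrite | github.com/smrfeld/the-masked-manual-python | themaskedmanual/companies.py | _strip_extra_words_in_company_name
-- ===== SOURCE A (Python) =====
-- def _strip_extra_words_in_company_name(s_in : str) -> str:
--     s = s_in
--
--     # Lowercase
--     s = s.lower()
--
--     # Commas, periods, paretheses
--     # Replace with spaces to fix problems such as co.ltd. -> co ltd
--     s = s.replace('.',' ').replace(',',' ').replace('(',' ').replace(')',' ').replace('[',' ').replace(']',' ').replace('&',' ')
--
--     # International
--     phrases_remove = [
--         'health care',
--         'automatic disposable',
--         'professional products',
--         'safety products',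
--         'filter technologies'
--     ]
--     for phrase in phrases_remove:
--         s = s.replace(phrase, '')
--
--     # Words cut
--     words_cut = [
--         'industries',
--         'healthcare',
--         'international',
--         'co',
--         'ltd',
--         'limited',
--         'coltd',
--         'company',
--         'asia',
--         'inc',
--         'intl',
--         'llc',
--         'medical',
--         'corp',
--         'corporation',
--         'and',
--         'japan',
--         'health',
--         'safety',
--         'trading',
--         'america',
--         'ag'
--     ]
--     sp = s.split()
--     sp = [x for x in sp if not x in words_cut]
--     s = ' '.join(sp)
--
--     # Strip words after aka
--     sp = s.split()
--     if 'aka' in sp: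
--         idx = sp.index('aka')
--         sp = sp[:idx]
--     s = ' '.join(sp)
--
--     # Fix double spaces
--     s = s.replace('  ', ' ')
--
--     # Remove leading/trailing spaces
--     s = s.strip()
--
--     return s
-- ===== SOURCE B (Python) =====
-- # Same normalization, but the word-cut and aka-truncation passes are fused into one
-- # token loop (single split, single join, no double-space/strip fixups needed).
--
-- _PHRASES_REMOVE = [
--     'health care',
--     'automatic disposable',
--     'professional products',
--     'safety products',
--     'filter technologies',
-- ]
--
-- _WORDS_CUT = frozenset([
--     'industries', 'healthcare', 'international', 'co', 'ltd', 'limited',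
--     'coltd', 'company', 'asia', 'inc', 'intl', 'llc', 'medical', 'corp',
--     'corporation', 'and', 'japan', 'health', 'safety', 'trading',
--     'america', 'ag',
-- ])
--
--
-- def _strip_extra_words_in_company_name(s_in: str) -> str:
--     s = s_in.lower()
--     for ch in '.,()[]&':
--         s = s.replace(ch, ' ')
--     for phrase in _PHRASES_REMOVE:
--         s = s.replace(phrase, '')
--     kept = []
--     for tok in s.split():
--         if tok == 'aka':
--             break
--         if tok not in _WORDS_CUT:
--             kept.append(tok)
--     return ' '.join(kept)
-- ===== Notes on version B (the rewrite author's own statement) =====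
-- stated objective: simpler
-- what changed: The two split/filter/join roundtrips (cut-word filtering, then re-split to truncate at 'aka') plus the trailing double-space fix and strip are fused into one split and a single token loop that breaks at 'aka', skips cut words, and joins once; the join of whitespace-free tokens needs no replace(' ',' ') or strip().
import Mathlib
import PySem

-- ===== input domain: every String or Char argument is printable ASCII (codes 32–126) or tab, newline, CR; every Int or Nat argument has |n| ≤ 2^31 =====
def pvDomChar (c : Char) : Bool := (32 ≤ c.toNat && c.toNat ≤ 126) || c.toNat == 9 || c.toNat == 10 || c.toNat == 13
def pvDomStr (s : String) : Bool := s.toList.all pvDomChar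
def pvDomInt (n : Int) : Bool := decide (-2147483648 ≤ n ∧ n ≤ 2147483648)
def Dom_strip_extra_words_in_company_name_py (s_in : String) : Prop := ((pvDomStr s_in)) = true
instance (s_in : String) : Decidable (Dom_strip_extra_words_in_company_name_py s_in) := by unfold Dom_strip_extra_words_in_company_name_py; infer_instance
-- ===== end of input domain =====

-- B fuses A's two split/filter/join roundtrips into one split and a single token loop
-- (break at 'aka', skip cut words, join once) — objective: simpler, same value.

-- ===== PORT A =====
def phrasesRemoveA : List String :=
  ["health care", "automatic disposable", "professional products", "safety products", "filter technologies"]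

def wordsCutA : List String :=
  ["industries", "healthcare", "international", "co", "ltd", "limited", "coltd", "company",
   "asia", "inc", "intl", "llc", "medical", "corp", "corporation", "and", "japan", "health",
   "safety", "trading", "america", "ag"]

def strip_extra_words_in_company_name_py (s_in : String) : String :=
  let s := PySem.Str.lower s_in
  let s := PySem.Str.replace (PySem.Str.replace (PySem.Str.replace (PySem.Str.replace
             (PySem.Str.replace (PySem.Str.replace (PySem.Str.replace s "." " ") "," " ")
             "(" " ") ")" " ") "[" " ") "]" " ") "&" " "
  let s := phrasesRemoveA.foldl (fun acc phrase => PySem.Str.replace acc phrase "") s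
  let sp := PySem.Str.split₀ s
  let sp := sp.filter (fun x => !(wordsCutA.contains x))
  let s := PySem.Str.join " " sp
  let sp := PySem.Str.split₀ s
  -- if 'aka' in sp: idx = sp.index('aka'); sp = sp[:idx]  (idx is a nonnegative index, so [:idx] = take)
  let sp := if sp.contains "aka" then sp.take ((PySem.List.index? sp "aka").getD 0) else sp
  let s := PySem.Str.join " " sp
  let s := PySem.Str.replace s "  " " "
  PySem.Str.strip s

-- ===== PORT B =====
def phrasesRemoveB : List String :=
  ["health care", "automatic disposable", "professional products", "safety products", "filter technologies"]

def cutSetB : PySem.Set String :=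
  PySem.Set.ofList
    ["industries", "healthcare", "international", "co", "ltd", "limited", "coltd", "company",
     "asia", "inc", "intl", "llc", "medical", "corp", "corporation", "and", "japan", "health",
     "safety", "trading", "america", "ag"]

-- the single token loop: break at 'aka', skip cut words, keep everything else
def keepTokensB : List String → List String
  | [] => []
  | t :: rest =>
    if t == "aka" then []
    else if cutSetB.contains t then keepTokensB rest
    else t :: keepTokensB rest

def strip_extra_words_in_company_name_py_alt (s_in : String) : String :=
  let s := PySem.Str.lower s_in
  let s := [".", ",", "(", ")", "[", "]", "&"].foldl (fun acc ch => PySem.Str.replace acc ch " ") s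
  let s := phrasesRemoveB.foldl (fun acc phrase => PySem.Str.replace acc phrase "") s
  PySem.Str.join " " (keepTokensB (PySem.Str.split₀ s))

-- ===== PRECONDITION & SPEC =====
def Spec_strip_extra_words_in_company_name_py (s_in : String) (out : String) : Prop := out = strip_extra_words_in_company_name_py_alt s_in
instance (s_in : String) (out : String) : Decidable (Spec_strip_extra_words_in_company_name_py s_in out) := by unfold Spec_strip_extra_words_in_company_name_py; infer_instance

-- ===== CLAIM (what is proved, stated in full; the proofs are below) =====
def Claim_equal_strip_extra_words_in_company_name_py : Prop := ∀ (s_in : String), Dom_strip_extra_words_in_company_name_py s_in → Spec_strip_extra_words_in_company_name_py s_in (strip_extra_words_in_company_name_py s_in)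

-- ===== LEMMAS AND PROOFS =====

-- a "good" token: nonempty and whitespace-free (what split() produces)
def GoodTok (t : List Char) : Prop := t ≠ [] ∧ ∀ c ∈ t, PySem.Chars.isspace c = false

theorem split₀_go_token (t : List Char) (ht : ∀ c ∈ t, PySem.Chars.isspace c = false)
    (rest cur : List Char) (acc : List (List Char)) :
    PySem.Chars.split₀.go (t ++ rest) cur acc = PySem.Chars.split₀.go rest (t.reverse ++ cur) acc := by
  induction t generalizing cur with
  | nil => simp
  | cons c t ih =>
    have hc : PySem.Chars.isspace c = false := ht c (by simp)
    rw [List.cons_append, PySem.Chars.split₀.go, hc]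
    simp only [Bool.false_eq_true, if_false]
    rw [ih (fun d hd => ht d (by simp [hd])) (c :: cur)]
    simp

theorem split₀_go_good (cs : List Char) (cur : List Char) (acc : List (List Char))
    (hacc : ∀ t ∈ acc, GoodTok t) (hcur : ∀ c ∈ cur, PySem.Chars.isspace c = false) :
    ∀ t ∈ PySem.Chars.split₀.go cs cur acc, GoodTok t := by
  induction cs generalizing cur acc with
  | nil =>
    rw [PySem.Chars.split₀.go]
    split_ifs with h
    · intro t ht; exact hacc t (by simpa using ht)
    · intro t ht
      rw [List.mem_reverse] at ht
      rcases List.mem_cons.mp ht with rfl | ht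
      · simp only [List.isEmpty_iff] at h
        exact ⟨by simpa using h, fun d hd => hcur d (List.mem_reverse.mp hd)⟩
      · exact hacc t ht
  | cons c rest ih =>
    rw [PySem.Chars.split₀.go]
    split_ifs with h1 h2
    · exact ih [] acc hacc (by simp)
    · refine ih [] (cur.reverse :: acc) ?_ (by simp)
      intro t ht
      rcases List.mem_cons.mp ht with rfl | ht
      · exact ⟨by simpa using fun hh => h2 (by simp [hh]), by
          intro d hd; exact hcur d (List.mem_reverse.mp hd)⟩
      · exact hacc t ht
    · refine ih (c :: cur) acc hacc ?_
      intro d hd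
      rcases List.mem_cons.mp hd with rfl | hd
      · simpa using h1
      · exact hcur d hd

theorem split₀_good (cs : List Char) : ∀ t ∈ PySem.Chars.split₀ cs, GoodTok t := by
  rw [PySem.Chars.split₀]
  exact split₀_go_good cs [] [] (by simp) (by simp)

theorem split₀_join_go (sp : List (List Char)) (hsp : ∀ t ∈ sp, GoodTok t)
    (acc : List (List Char)) :
    PySem.Chars.split₀.go (PySem.Chars.join [' '] sp) [] acc = acc.reverse ++ sp := by
  induction sp generalizing acc with
  | nil => simp [PySem.Chars.join_nil, PySem.Chars.split₀.go]
  | cons t rest ih =>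
    obtain ⟨htne, htsf⟩ := hsp t (by simp)
    cases rest with
    | nil =>
      rw [PySem.Chars.join_singleton]
      rw [show t = t ++ [] by simp, split₀_go_token t htsf [] [] acc]
      rw [PySem.Chars.split₀.go]
      simp [List.isEmpty_iff, htne]
    | cons u r =>
      rw [PySem.Chars.join_cons_cons, List.append_assoc, split₀_go_token t htsf _ [] acc]
      have : ([' '] ++ PySem.Chars.join [' '] (u :: r)) = ' ' :: PySem.Chars.join [' '] (u :: r) := by simp
      rw [this, PySem.Chars.split₀.go]
      have hsp' : PySem.Chars.isspace ' ' = true := by decide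
      rw [hsp']
      simp only [if_true, List.append_nil, List.isEmpty_iff, List.reverse_eq_nil_iff]
      rw [if_neg htne]
      rw [ih (fun x hx => hsp x (by simp [hx])) (t.reverse.reverse :: acc)]
      simp

theorem split₀_join (sp : List (List Char)) (hsp : ∀ t ∈ sp, GoodTok t) :
    PySem.Chars.split₀ (PySem.Chars.join [' '] sp) = sp := by
  rw [PySem.Chars.split₀, split₀_join_go sp hsp]
  simp

-- no two adjacent spaces
def NoDbl : List Char → Bool
  | [] => true
  | [_] => true
  | a :: b :: r => !(a == ' ' && b == ' ') && NoDbl (b :: r)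

theorem noDbl_tail (c : Char) (t : List Char) (h : NoDbl (c :: t) = true) : NoDbl t = true := by
  cases t with
  | nil => rfl
  | cons b r => rw [NoDbl] at h; exact ((Bool.and_eq_true _ _).mp h).2

theorem noDbl_spacefree (t : List Char) (h : ∀ c ∈ t, c ≠ ' ') : NoDbl t = true := by
  induction t with
  | nil => rfl
  | cons c t ih =>
    cases t with
    | nil => rfl
    | cons b r =>
      rw [NoDbl, Bool.and_eq_true]
      refine ⟨by simp [h c (by simp)], ih (fun d hd => h d (by simp [hd]))⟩

theorem noDbl_prepend (t : List Char) (ht : ∀ c ∈ t, c ≠ ' ')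
    (l : List Char) (hl : NoDbl l = true) : NoDbl (t ++ l) = true := by
  induction t with
  | nil => simpa
  | cons c t ih =>
    have hc : c ≠ ' ' := ht c (by simp)
    have htl := ih (fun d hd => ht d (by simp [hd]))
    rw [List.cons_append]
    cases hte : t ++ l with
    | nil => rfl
    | cons b r =>
      rw [NoDbl, Bool.and_eq_true]
      rw [hte] at htl
      exact ⟨by simp [hc], htl⟩

theorem replace_go_noop (fuel : Nat) (l acc : List Char) (h : NoDbl l = true) :
    PySem.Chars.replace.go [' ', ' '] [' '] fuel l acc = acc.reverse ++ l := by
  induction fuel generalizing l acc with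
  | zero => rw [PySem.Chars.replace.go]
  | succ fuel ih =>
    cases l with
    | nil => simp [PySem.Chars.replace.go]
    | cons c t =>
      rw [PySem.Chars.replace.go]
      have hpre : ([' ', ' '].isPrefixOf (c :: t)) = false := by
        cases t with
        | nil => simp [List.isPrefixOf]
        | cons b r =>
          rw [NoDbl] at h
          have hnd : c ≠ ' ' ∨ b ≠ ' ' := by
            have h1 := ((Bool.and_eq_true _ _).mp h).1
            by_contra hcon
            push Not at hcon
            rw [hcon.1, hcon.2] at h1; simp at h1
          simp only [List.isPrefixOf]
          have h1' : (' ' == c) = false ∨ (' ' == b) = false := by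
            rcases hnd with h1 | h1
            · exact Or.inl (beq_eq_false_iff_ne.mpr (fun He => h1 He.symm))
            · exact Or.inr (beq_eq_false_iff_ne.mpr (fun He => h1 He.symm))
          rcases h1' with h1 | h1 <;> simp [h1]
      rw [hpre]
      simp only [Bool.false_eq_true, if_false]
      rw [ih t (c :: acc) (noDbl_tail c t h)]
      simp

theorem getLast?_cons_ne_nil (c : Char) (l : List Char) (h : l ≠ []) :
    (c :: l).getLast? = l.getLast? := by
  cases l with
  | nil => exact absurd rfl h
  | cons d t => simp [List.getLast?_cons_cons]

theorem spacefree_of_good (t : List Char) (h : ∀ c ∈ t, PySem.Chars.isspace c = false) :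
    ∀ c ∈ t, c ≠ ' ' := by
  intro c hc he
  have := h c hc
  rw [he] at this
  simp [PySem.Chars.isspace] at this

theorem join_ne_nil (sp : List (List Char)) (hne : sp ≠ []) (hsp : ∀ t ∈ sp, GoodTok t) :
    PySem.Chars.join [' '] sp ≠ [] := by
  cases sp with
  | nil => exact absurd rfl hne
  | cons t rest =>
    obtain ⟨htne, -⟩ := hsp t (by simp)
    cases rest with
    | nil => rw [PySem.Chars.join_singleton]; exact htne
    | cons u r =>
      rw [PySem.Chars.join_cons_cons]
      simp [htne]

theorem join_head (sp : List (List Char)) (hsp : ∀ t ∈ sp, GoodTok t) :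
    ∀ c, (PySem.Chars.join [' '] sp).head? = some c → PySem.Chars.isspace c = false := by
  cases sp with
  | nil => intro c hc; rw [PySem.Chars.join_nil] at hc; simp at hc
  | cons t rest =>
    obtain ⟨htne, htsf⟩ := hsp t (by simp)
    intro c hc
    apply htsf
    cases rest with
    | nil =>
      rw [PySem.Chars.join_singleton] at hc
      exact List.mem_of_mem_head? (by rw [hc]; simp)
    | cons u r =>
      rw [PySem.Chars.join_cons_cons, List.append_assoc, List.head?_append] at hc
      cases ht : t.head? with
      | none => exact absurd (List.head?_eq_none_iff.mp ht) htne
      | some d =>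
        rw [ht] at hc
        simp at hc
        subst hc
        exact List.mem_of_mem_head? (by rw [ht]; simp)

theorem join_last (sp : List (List Char)) (hsp : ∀ t ∈ sp, GoodTok t) :
    ∀ c, (PySem.Chars.join [' '] sp).getLast? = some c → PySem.Chars.isspace c = false := by
  induction sp with
  | nil => intro c hc; rw [PySem.Chars.join_nil] at hc; simp at hc
  | cons t rest ih =>
    obtain ⟨htne, htsf⟩ := hsp t (by simp)
    intro c hc
    cases rest with
    | nil =>
      rw [PySem.Chars.join_singleton] at hc
      exact htsf c (List.mem_of_getLast? hc)
    | cons u r =>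
      have hJne : PySem.Chars.join [' '] (u :: r) ≠ [] :=
        join_ne_nil _ (by simp) (fun x hx => hsp x (by simp [hx]))
      rw [PySem.Chars.join_cons_cons, List.append_assoc,
          List.getLast?_append_of_ne_nil _ (by simp)] at hc
      rw [show ([' '] ++ PySem.Chars.join [' '] (u :: r)) = ' ' :: PySem.Chars.join [' '] (u :: r) by simp,
          getLast?_cons_ne_nil ' ' _ hJne] at hc
      exact ih (fun x hx => hsp x (by simp [hx])) c hc

theorem join_noDbl (sp : List (List Char)) (hsp : ∀ t ∈ sp, GoodTok t) :
    NoDbl (PySem.Chars.join [' '] sp) = true := by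
  induction sp with
  | nil => rw [PySem.Chars.join_nil]; rfl
  | cons t rest ih =>
    obtain ⟨htne, htsf⟩ := hsp t (by simp)
    cases rest with
    | nil =>
      rw [PySem.Chars.join_singleton]
      exact noDbl_spacefree t (spacefree_of_good t htsf)
    | cons u r =>
      rw [PySem.Chars.join_cons_cons, List.append_assoc]
      apply noDbl_prepend t (spacefree_of_good t htsf)
      have hrest : ∀ x ∈ u :: r, GoodTok x := fun x hx => hsp x (by simp [hx])
      rw [show ([' '] ++ PySem.Chars.join [' '] (u :: r)) = ' ' :: PySem.Chars.join [' '] (u :: r) by simp]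
      cases hJ : PySem.Chars.join [' '] (u :: r) with
      | nil => rfl
      | cons d J' =>
        rw [NoDbl, Bool.and_eq_true]
        constructor
        · have hd : PySem.Chars.isspace d = false := join_head _ hrest d (by rw [hJ]; rfl)
          have : d ≠ ' ' := by intro he; rw [he] at hd; simp [PySem.Chars.isspace] at hd
          simp [this]
        · rw [← hJ]; exact ih hrest

theorem strip_noop (l : List Char)
    (hh : ∀ c, l.head? = some c → PySem.Chars.isspace c = false)
    (hl : ∀ c, l.getLast? = some c → PySem.Chars.isspace c = false) :
    PySem.Chars.strip l = l := by
  rw [PySem.Chars.strip, PySem.Chars.lstrip]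
  have h1 : List.dropWhile PySem.Chars.isspace l = l := by
    cases l with
    | nil => rfl
    | cons c t => rw [List.dropWhile_cons, hh c rfl]; simp
  rw [h1, PySem.Chars.rstrip]
  have h2 : List.dropWhile PySem.Chars.isspace l.reverse = l.reverse := by
    cases hr : l.reverse with
    | nil => rfl
    | cons c t =>
      rw [List.dropWhile_cons]
      have : l.getLast? = some c := by
        rw [← List.head?_reverse, hr]; rfl
      rw [hl c this]
      simp
  rw [h2, List.reverse_reverse]

-- String-level consequences
theorem str_split₀_eq (s : String) :
    PySem.Str.split₀ s = (PySem.Chars.split₀ s.toList).map String.ofList := rfl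

theorem str_split₀_good (s : String) : ∀ t ∈ PySem.Str.split₀ s, GoodTok t.toList := by
  intro t ht
  rw [str_split₀_eq] at ht
  obtain ⟨u, hu, rfl⟩ := List.mem_map.mp ht
  simpa using split₀_good s.toList u hu

theorem str_join_toList (sp : List String) :
    (PySem.Str.join " " sp).toList = PySem.Chars.join [' '] (sp.map String.toList) := by
  rw [PySem.Str.join]
  simp

theorem str_split_join (sp : List String) (h : ∀ t ∈ sp, GoodTok t.toList) :
    PySem.Str.split₀ (PySem.Str.join " " sp) = sp := by
  rw [str_split₀_eq, str_join_toList, split₀_join _ (by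
    intro t ht
    obtain ⟨u, hu, rfl⟩ := List.mem_map.mp ht
    exact h u hu)]
  simp [List.map_map, Function.comp_def]

theorem str_tail_noop (sp : List String) (h : ∀ t ∈ sp, GoodTok t.toList) :
    PySem.Str.strip (PySem.Str.replace (PySem.Str.join " " sp) "  " " ") = PySem.Str.join " " sp := by
  have hgood : ∀ t ∈ sp.map String.toList, GoodTok t := by
    intro t ht
    obtain ⟨u, hu, rfl⟩ := List.mem_map.mp ht
    exact h u hu
  rw [PySem.Str.replace]
  rw [show ((PySem.Str.join " " sp).toList) = PySem.Chars.join [' '] (sp.map String.toList) from str_join_toList sp]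
  rw [show ("  " : String).toList = [' ', ' '] from rfl, show (" " : String).toList = [' '] from rfl]
  rw [PySem.Chars.replace]
  simp only [List.isEmpty_iff, if_neg (by simp : ¬([' ',' '] : List Char) = [])]
  rw [replace_go_noop _ _ _ (join_noDbl _ hgood)]
  rw [PySem.Str.strip]
  simp only [List.reverse_nil, List.nil_append]
  rw [show (String.ofList (PySem.Chars.join [' '] (sp.map String.toList))).toList
        = PySem.Chars.join [' '] (sp.map String.toList) by simp]
  rw [strip_noop _ (join_head _ hgood) (join_last _ hgood)]
  rw [PySem.Str.join, show (" " : String).toList = [' '] from rfl]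

theorem keep_mem (l : List String) : ∀ t ∈ keepTokensB l, t ∈ l := by
  induction l with
  | nil => simp [keepTokensB]
  | cons t rest ih =>
    rw [keepTokensB]
    split_ifs with h1 h2
    · simp
    · intro x hx; exact List.mem_cons_of_mem t (ih x hx)
    · intro x hx
      rcases List.mem_cons.mp hx with rfl | hx
      · simp
      · exact List.mem_cons_of_mem t (ih x hx)

theorem cut_contains_eq (t : String) : cutSetB.contains t = wordsCutA.contains t := by
  have h : cutSetB = wordsCutA := by decide
  rw [h]; rfl

theorem trunc_eq_keep (l : List String) :
    (let f := l.filter (fun x => !(wordsCutA.contains x));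
     if f.contains "aka" then f.take ((PySem.List.index? f "aka").getD 0) else f) = keepTokensB l := by
  simp only []
  induction l with
  | nil => simp [keepTokensB]
  | cons t rest ih =>
    by_cases h1 : t = "aka"
    · subst h1
      have hR : keepTokensB ("aka" :: rest) = [] := by rw [keepTokensB]; simp
      rw [hR, List.filter_cons_of_pos (by decide), if_pos (by simp),
          PySem.List.index?_cons_self]
      simp
    · by_cases h3 : wordsCutA.contains t = true
      · have hR : keepTokensB (t :: rest) = keepTokensB rest := by
          rw [keepTokensB, if_neg (by simp [h1]), if_pos (by rw [cut_contains_eq]; exact h3)]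
        rw [hR, List.filter_cons_of_neg (by simpa using h3)]
        exact ih
      · have hR : keepTokensB (t :: rest) = t :: keepTokensB rest := by
          rw [keepTokensB, if_neg (by simp [h1]), if_neg (by rw [cut_contains_eq]; exact h3)]
        rw [hR, List.filter_cons_of_pos (by simp at h3 ⊢; exact h3)]
        set f := rest.filter (fun x => !(wordsCutA.contains x)) with hf
        by_cases h4 : f.contains "aka" = true
        · rw [if_pos (by simp only [List.contains_cons, h4, Bool.or_true])]
          obtain ⟨k, hk⟩ := Option.isSome_iff_exists.mp
            ((PySem.List.index?_isSome_iff f "aka").mpr (by simpa using h4))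
          rw [PySem.List.index?_cons_of_ne f (by simpa using h1), hk]
          simp only [Option.map_some, Option.getD_some]
          rw [List.take_succ_cons, ← ih, if_pos h4, hk]
          simp
        · rw [if_neg (by
            simp only [List.contains_cons, Bool.or_eq_true, beq_iff_eq]
            rintro (he | hm)
            · exact h1 he.symm
            · exact h4 (by simpa using hm)), ← ih, if_neg h4]

-- the whole pipeline after the common preprocessing string s
theorem pipeline_eq (s : String) :
    (let sp := PySem.Str.split₀ s;
     let sp := sp.filter (fun x => !(wordsCutA.contains x));
     let s1 := PySem.Str.join " " sp;
     let sp := PySem.Str.split₀ s1;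
     let sp := if sp.contains "aka" then sp.take ((PySem.List.index? sp "aka").getD 0) else sp;
     let s2 := PySem.Str.join " " sp;
     PySem.Str.strip (PySem.Str.replace s2 "  " " "))
    = PySem.Str.join " " (keepTokensB (PySem.Str.split₀ s)) := by
  simp only []
  have hgood0 := str_split₀_good s
  have hgood1 : ∀ t ∈ (PySem.Str.split₀ s).filter (fun x => !(wordsCutA.contains x)), GoodTok t.toList :=
    fun t ht => hgood0 t (List.mem_of_mem_filter ht)
  rw [str_split_join _ hgood1]
  rw [trunc_eq_keep (PySem.Str.split₀ s)]
  exact str_tail_noop _ (fun t ht => hgood0 t (keep_mem _ t ht))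

-- ===== VERDICT (by name: the statement is the Claim_ definition above) =====
theorem strip_extra_words_in_company_name_py_spec : Claim_equal_strip_extra_words_in_company_name_py := by
  intro s_in _
  unfold Spec_strip_extra_words_in_company_name_py
  unfold strip_extra_words_in_company_name_py strip_extra_words_in_company_name_py_alt
  simp only [phrasesRemoveA, phrasesRemoveB, List.foldl]
  exact (pipeline_eq _).symm ▸ rfl
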